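-- pv_equiv track=rewrite | github.com/AndrewPau/interview | kGroups.py | findKGroup
-- ===== SOURCE A (Python) =====
-- def findKGroup(P, k):
--     node = TreeNode(P[0])
--     left, right = P[0] - 1, len(P) - P[0]
--     if left == k or right == k:
--         return 1
--     for day in range(1, len(P)):
--         left, right = insert(node, P[day], 1, len(P))
--         if left == k or right == k:
--             return day+1
--     return -1
--
-- def insert(node, val, left, right):
--     curr = node
--     while curr != None:
--         if val > curr.val:
--             left = curr.val + 1
--             if curr.right == None:
--                 curr.right = TreeNode(val)
--                 break
--             else:
--                 curr = curr.right
--         else: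
--             right = curr.val - 1
--             if curr.left == None:
--                 curr.left = TreeNode(val)
--                 break
--             else:
--                 curr = curr.left
--     return (val - left, right - val)
--
-- class TreeNode(object):
--     def __init__(self, val):
--         self.val = val
--         self.left = None
--         self.right = None
-- ===== SOURCE B (Python) =====
-- def findKGroup(P, k):
--     n = len(P)
--     seen = []
--     for day, v in enumerate(P):
--         lo = None
--         hi = None
--         for u in seen:
--             if u < v:
--                 if lo is None or u > lo:
--                     lo = u
--             elif hi is None or u < hi:
--                 hi = u
--         left = 1 if lo is None else lo + 1
--         right = n if hi is None else hi - 1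
--         if v - left == k or right - v == k:
--             return day + 1
--         seen.append(v)
--     return -1
-- ===== Notes on version B (the rewrite author's own statement) =====
-- stated objective: simpler
-- what changed: Replaced the mutable BST (TreeNode class plus insert walk tracking path bounds) by a plain per-day scan of the already-seen prices taking the max of those below and the min of those at-or-above the day's price; no tree, no node class.
-- outside the precondition, e.g. on findKGroup([], 0): A raises IndexError, B returns -1
import Mathlib
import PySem

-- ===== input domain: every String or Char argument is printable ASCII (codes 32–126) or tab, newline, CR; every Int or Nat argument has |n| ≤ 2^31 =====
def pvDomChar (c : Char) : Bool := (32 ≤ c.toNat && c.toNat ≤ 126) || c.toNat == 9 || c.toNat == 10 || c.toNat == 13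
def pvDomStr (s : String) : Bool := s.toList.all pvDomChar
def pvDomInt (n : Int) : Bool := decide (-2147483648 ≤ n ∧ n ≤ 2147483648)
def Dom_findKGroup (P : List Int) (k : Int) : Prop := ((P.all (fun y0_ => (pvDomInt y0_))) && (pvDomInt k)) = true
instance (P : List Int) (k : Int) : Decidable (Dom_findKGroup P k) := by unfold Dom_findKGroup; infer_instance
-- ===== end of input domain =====

-- B replaces A's mutable BST by a per-day linear scan of the seen prefix (max below / min at-or-above); objective: simpler.

-- ===== PORT A =====
inductive PvTree where
  | leaf : PvTree
  | node : Int → PvTree → PvTree → PvTree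
deriving DecidableEq, Repr

-- Python's `insert` (while loop walking the tree, mutating): returns (new tree, val-left, right-val).
def pvInsert (t : PvTree) (val l r : Int) : PvTree × Int × Int :=
  match t with
  | .leaf => (.leaf, val - l, r - val)   -- while-loop body never runs when curr is None
  | .node c tl tr =>
    if val > c then
      match tr with
      | .leaf => (.node c tl (.node val .leaf .leaf), val - (c + 1), r - val)
      | .node c2 a b => let res := pvInsert (.node c2 a b) val (c + 1) r
                        (.node c tl res.1, res.2)
    else
      match tl with
      | .leaf => (.node c (.node val .leaf .leaf) tr, val - l, (c - 1) - val)
      | .node c2 a b => let res := pvInsert (.node c2 a b) val l (c - 1)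
                        (.node c res.1 tr, res.2)

-- the `for day in range(1, len(P))` loop with early return
def pvALoop (t : PvTree) (xs : List Int) (day n k : Int) : Int :=
  match xs with
  | [] => -1
  | v :: rest =>
    let res := pvInsert t v 1 n
    if res.2.1 = k ∨ res.2.2 = k then day + 1
    else pvALoop res.1 rest (day + 1) n k

def findKGroup (P : List Int) (k : Int) : Int :=
  match P with
  | [] => -1   -- Python raises IndexError on P[0]; excluded by Pre_findKGroup
  | p0 :: rest =>
    let n : Int := (P.length : Int)
    let left := p0 - 1
    let right := n - p0
    if left = k ∨ right = k then 1
    else pvALoop (.node p0 .leaf .leaf) rest 1 n k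

-- ===== PORT B =====
-- the inner `for u in seen` loop updating (lo, hi)
def pvScan (v : Int) (seen : List Int) : Option Int × Option Int :=
  seen.foldl
    (fun st u =>
      if u < v then
        match st.1 with
        | none => (some u, st.2)
        | some l => if u > l then (some u, st.2) else (some l, st.2)
      else
        match st.2 with
        | none => (st.1, some u)
        | some h => if u < h then (st.1, some u) else (st.1, some h))
    (none, none)

-- the `for day, v in enumerate(P)` loop with early return and `seen.append(v)`
def pvBLoop (xs seen : List Int) (day n k : Int) : Int :=
  match xs with
  | [] => -1
  | v :: rest =>
    let st := pvScan v seen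
    let left : Int := match st.1 with | none => 1 | some l => l + 1
    let right : Int := match st.2 with | none => n | some h => h - 1
    if v - left = k ∨ right - v = k then day + 1
    else pvBLoop rest (seen ++ [v]) (day + 1) n k

def findKGroup_alt (P : List Int) (k : Int) : Int :=
  pvBLoop P [] 0 (P.length : Int) k

-- ===== PRECONDITION & SPEC =====
-- Pre_ excludes only the empty list, on which Python A raises IndexError (P[0]).
def Pre_findKGroup (P : List Int) (k : Int) : Prop := P ≠ []
instance (P : List Int) (k : Int) : Decidable (Pre_findKGroup P k) := by unfold Pre_findKGroup; infer_instance
def pvWitness_findKGroup : List Int × Int := ([2, 1, 3], 1)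

def Spec_findKGroup (P : List Int) (k : Int) (out : Int) : Prop := out = findKGroup_alt P k
instance (P : List Int) (k : Int) (out : Int) : Decidable (Spec_findKGroup P k out) := by unfold Spec_findKGroup; infer_instance

-- ===== CLAIM (what is proved, stated in full; the proofs are below) =====
def Claim_equal_findKGroup : Prop := ∀ (P : List Int) (k : Int), Dom_findKGroup P k → Pre_findKGroup P k → Spec_findKGroup P k (findKGroup P k)

-- ===== LEMMAS AND PROOFS =====

-- specification folds: max of elements < v, min of elements ≥ v
def omaxU (a : Option Int) (u : Int) : Option Int :=
  match a with | none => some u | some x => some (max x u)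
def ominU (a : Option Int) (u : Int) : Option Int :=
  match a with | none => some u | some x => some (min x u)
def loSpec (v : Int) (s : List Int) : Option Int :=
  s.foldl (fun a u => if u < v then omaxU a u else a) none
def hiSpec (v : Int) (s : List Int) : Option Int :=
  s.foldl (fun a u => if u < v then a else ominU a u) none

def omaxO : Option Int → Option Int → Option Int
  | none, b => b
  | some x, none => some x
  | some x, some y => some (max x y)
def ominO : Option Int → Option Int → Option Int
  | none, b => b
  | some x, none => some x
  | some x, some y => some (min x y)

theorem omaxO_assoc (a b c : Option Int) : omaxO (omaxO a b) c = omaxO a (omaxO b c) := by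
  cases a <;> cases b <;> cases c <;> simp [omaxO, max_assoc]
theorem omaxO_comm (a b : Option Int) : omaxO a b = omaxO b a := by
  cases a <;> cases b <;> simp [omaxO, max_comm]
theorem ominO_assoc (a b c : Option Int) : ominO (ominO a b) c = ominO a (ominO b c) := by
  cases a <;> cases b <;> cases c <;> simp [ominO, min_assoc]
theorem ominO_comm (a b : Option Int) : ominO a b = ominO b a := by
  cases a <;> cases b <;> simp [ominO, min_comm]
theorem omaxU_eq (a : Option Int) (u : Int) : omaxU a u = omaxO a (some u) := by
  cases a <;> rfl
theorem ominU_eq (a : Option Int) (u : Int) : ominU a u = ominO a (some u) := by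
  cases a <;> rfl

theorem loSpec_master (v : Int) (s : List Int) : ∀ a,
    s.foldl (fun a u => if u < v then omaxU a u else a) a = omaxO a (loSpec v s) := by
  induction s with
  | nil => intro a; cases a <;> rfl
  | cons u s ih =>
    intro a
    by_cases h : u < v
    · have h3 : loSpec v (u :: s) = omaxO (some u) (loSpec v s) := by
        rw [loSpec, List.foldl_cons, if_pos h]
        exact ih (omaxU none u)
      rw [h3, List.foldl_cons, if_pos h, ih (omaxU a u), omaxU_eq, omaxO_assoc]
    · have h3 : loSpec v (u :: s) = loSpec v s := by
        rw [loSpec, List.foldl_cons, if_neg h]; rfl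
      rw [h3, List.foldl_cons, if_neg h, ih a]

theorem hiSpec_master (v : Int) (s : List Int) : ∀ a,
    s.foldl (fun a u => if u < v then a else ominU a u) a = ominO a (hiSpec v s) := by
  induction s with
  | nil => intro a; cases a <;> rfl
  | cons u s ih =>
    intro a
    by_cases h : u < v
    · have h3 : hiSpec v (u :: s) = hiSpec v s := by
        rw [hiSpec, List.foldl_cons, if_pos h]; rfl
      rw [h3, List.foldl_cons, if_pos h, ih a]
    · have h3 : hiSpec v (u :: s) = ominO (some u) (hiSpec v s) := by
        rw [hiSpec, List.foldl_cons, if_neg h]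
        exact ih (ominU none u)
      rw [h3, List.foldl_cons, if_neg h, ih (ominU a u), ominU_eq, ominO_assoc]

theorem loSpec_cons (v u : Int) (s : List Int) :
    loSpec v (u :: s) = if u < v then omaxO (some u) (loSpec v s) else loSpec v s := by
  by_cases h : u < v
  · rw [if_pos h, loSpec, List.foldl_cons, if_pos h]; exact loSpec_master v s (omaxU none u)
  · rw [if_neg h, loSpec, List.foldl_cons, if_neg h]; rfl

theorem hiSpec_cons (v u : Int) (s : List Int) :
    hiSpec v (u :: s) = if u < v then hiSpec v s else ominO (some u) (hiSpec v s) := by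
  by_cases h : u < v
  · rw [if_pos h, hiSpec, List.foldl_cons, if_pos h]; rfl
  · rw [if_neg h, hiSpec, List.foldl_cons, if_neg h]; exact hiSpec_master v s (ominU none u)

theorem loSpec_append (v : Int) (s t : List Int) :
    loSpec v (s ++ t) = omaxO (loSpec v s) (loSpec v t) := by
  rw [loSpec, List.foldl_append, loSpec_master]; rfl

theorem hiSpec_append (v : Int) (s t : List Int) :
    hiSpec v (s ++ t) = ominO (hiSpec v s) (hiSpec v t) := by
  rw [hiSpec, List.foldl_append, hiSpec_master]; rfl

theorem loSpec_perm (v : Int) {s t : List Int} (h : s.Perm t) : loSpec v s = loSpec v t := by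
  induction h with
  | nil => rfl
  | cons x _ ih => rw [loSpec_cons, loSpec_cons, ih]
  | swap x y s =>
    rw [loSpec_cons, loSpec_cons, loSpec_cons, loSpec_cons]
    by_cases hx : x < v <;> by_cases hy : y < v <;>
      simp [hx, hy, ← omaxO_assoc, omaxO_comm (some x) (some y)]
  | trans _ _ ih1 ih2 => rw [ih1, ih2]

theorem hiSpec_perm (v : Int) {s t : List Int} (h : s.Perm t) : hiSpec v s = hiSpec v t := by
  induction h with
  | nil => rfl
  | cons x _ ih => rw [hiSpec_cons, hiSpec_cons, ih]
  | swap x y s =>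
    rw [hiSpec_cons, hiSpec_cons, hiSpec_cons, hiSpec_cons]
    by_cases hx : x < v <;> by_cases hy : y < v <;>
      simp [hx, hy, ← ominO_assoc, ominO_comm (some x) (some y)]
  | trans _ _ ih1 ih2 => rw [ih1, ih2]

-- B's scan computes exactly (loSpec, hiSpec)
theorem pvScan_eq (v : Int) (s : List Int) : pvScan v s = (loSpec v s, hiSpec v s) := by
  have key : ∀ (s : List Int) (a b : Option Int),
      s.foldl
        (fun st u =>
          if u < v then
            match st.1 with
            | none => (some u, st.2)
            | some l => if u > l then (some u, st.2) else (some l, st.2)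
          else
            match st.2 with
            | none => (st.1, some u)
            | some h => if u < h then (st.1, some u) else (st.1, some h))
        (a, b)
      = (s.foldl (fun a u => if u < v then omaxU a u else a) a,
         s.foldl (fun a u => if u < v then a else ominU a u) b) := by
    intro s
    induction s with
    | nil => intro a b; rfl
    | cons u s ih =>
      intro a b
      rw [List.foldl_cons, List.foldl_cons, List.foldl_cons]
      have hstep :
          (if u < v then
            match (a, b).1 with
            | none => (some u, (a, b).2)
            | some l => if u > l then (some u, (a, b).2) else (some l, (a, b).2)
          else
            match (a, b).2 with
            | none => ((a, b).1, some u)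
            | some h => if u < h then ((a, b).1, some u) else ((a, b).1, some h))
          = (if u < v then omaxU a u else a, if u < v then b else ominU b u) := by
        by_cases h : u < v
        · rw [if_pos h, if_pos h, if_pos h]
          cases a with
          | none => rfl
          | some l =>
            by_cases h2 : u > l
            · simp [h2, omaxU, max_eq_right (le_of_lt h2)]
            · simp [h2, omaxU, max_eq_left (le_of_not_gt h2)]
        · rw [if_neg h, if_neg h, if_neg h]
          cases b with
          | none => rfl
          | some hh =>
            by_cases h2 : u < hh
            · simp [h2, ominU, min_eq_right (le_of_lt h2)]
            · simp [h2, ominU, min_eq_left (le_of_not_gt h2)]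
      rw [hstep]
      exact ih _ _
  exact key s none none

-- tree elements (in-order) and the BST invariant
def pvElems : PvTree → List Int
  | .leaf => []
  | .node c l r => pvElems l ++ c :: pvElems r

def pvInv : PvTree → Prop
  | .leaf => True
  | .node c l r => (∀ x ∈ pvElems l, x ≤ c) ∧ (∀ x ∈ pvElems r, c < x) ∧ pvInv l ∧ pvInv r

theorem loSpec_none (v : Int) (s : List Int) (h : ∀ u ∈ s, ¬ u < v) : loSpec v s = none := by
  induction s with
  | nil => rfl
  | cons u s ih =>
    rw [loSpec_cons, if_neg (h u (by simp))]
    exact ih fun u hu => h u (by simp [hu])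

theorem hiSpec_none (v : Int) (s : List Int) (h : ∀ u ∈ s, u < v) : hiSpec v s = none := by
  induction s with
  | nil => rfl
  | cons u s ih =>
    rw [hiSpec_cons, if_pos (h u (by simp))]
    exact ih fun u hu => h u (by simp [hu])

theorem loSpec_mem (v : Int) (s : List Int) {m : Int} (h : loSpec v s = some m) : m ∈ s := by
  induction s generalizing m with
  | nil => simp [loSpec] at h
  | cons u s ih =>
    rw [loSpec_cons] at h
    by_cases hu : u < v
    · rw [if_pos hu] at h
      cases hls : loSpec v s with
      | none => rw [hls] at h; simp [omaxO] at h; simp [h]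
      | some m' =>
        rw [hls] at h; simp [omaxO] at h
        rcases max_choice u m' with hc | hc <;> rw [hc] at h
        · simp [h]
        · simp [h ▸ ih hls]
    · rw [if_neg hu] at h; simp [ih h]

theorem hiSpec_mem (v : Int) (s : List Int) {m : Int} (h : hiSpec v s = some m) : m ∈ s := by
  induction s generalizing m with
  | nil => simp [hiSpec] at h
  | cons u s ih =>
    rw [hiSpec_cons] at h
    by_cases hu : u < v
    · rw [if_pos hu] at h; simp [ih h]
    · rw [if_neg hu] at h
      cases hls : hiSpec v s with
      | none => rw [hls] at h; simp [ominO] at h; simp [h]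
      | some m' =>
        rw [hls] at h; simp [ominO] at h
        rcases min_choice u m' with hc | hc <;> rw [hc] at h
        · simp [h]
        · simp [h ▸ ih hls]

-- the bounds A's BST walk computes, from loSpec/hiSpec
def pvLout (v : Int) (s : List Int) (l : Int) : Int :=
  match loSpec v s with | none => l | some m => m + 1
def pvRout (v : Int) (s : List Int) (r : Int) : Int :=
  match hiSpec v s with | none => r | some m => m - 1

-- A's insert returns exactly the predecessor/successor gaps
theorem pvInsert_bounds (t : PvTree) (hinv : pvInv t) (v l r : Int) :
    (pvInsert t v l r).2 = (v - pvLout v (pvElems t) l, pvRout v (pvElems t) r - v) := by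
  induction t generalizing l r with
  | leaf => simp [pvInsert, pvElems, pvLout, pvRout, loSpec, hiSpec]
  | node c tl tr ihl ihr =>
    obtain ⟨hle, hgt, hil, hir⟩ := hinv
    by_cases hv : v > c
    · have htl_lt : ∀ u ∈ pvElems tl, u < v := fun u hu => lt_of_le_of_lt (hle u hu) hv
      have hlo : loSpec v (pvElems (PvTree.node c tl tr))
          = omaxO (some c) (loSpec v (pvElems tr)) := by
        rw [pvElems, loSpec_append, loSpec_cons, if_pos hv]
        cases hls : loSpec v (pvElems tl) with
        | none => simp [omaxO]
        | some m =>
          have hm : m ≤ c := hle m (loSpec_mem v _ hls)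
          cases loSpec v (pvElems tr) <;> simp [omaxO] <;> omega
      have hhi : hiSpec v (pvElems (PvTree.node c tl tr)) = hiSpec v (pvElems tr) := by
        rw [pvElems, hiSpec_append, hiSpec_cons, if_pos hv,
          hiSpec_none v _ htl_lt]
        rfl
      cases htr : tr with
      | leaf =>
        subst htr
        rw [pvInsert.eq_def]; simp only [if_pos hv]
        rw [pvLout, pvRout, hlo, hhi]
        simp [pvElems, loSpec, hiSpec, omaxO]
      | node c2 a b =>
        subst htr
        rw [pvInsert.eq_def]; simp only [if_pos hv]
        rw [ihr hir (c + 1) r, pvLout, pvLout, pvRout, pvRout, hlo, hhi]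
        congr 2
        cases hls : loSpec v (pvElems (PvTree.node c2 a b)) with
        | none => simp [omaxO]
        | some m =>
          have : c < m := hgt m (loSpec_mem v _ hls)
          simp [omaxO]; omega
    · have htr_ge : ∀ u ∈ pvElems tr, ¬ u < v := fun u hu => by
        have := hgt u hu; omega
      have hcge : ¬ c < v := by omega
      have hlo : loSpec v (pvElems (PvTree.node c tl tr)) = loSpec v (pvElems tl) := by
        rw [pvElems, loSpec_append, loSpec_cons, if_neg hcge, loSpec_none v _ htr_ge]
        cases loSpec v (pvElems tl) <;> rfl
      have hhi : hiSpec v (pvElems (PvTree.node c tl tr))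
          = ominO (hiSpec v (pvElems tl)) (some c) := by
        rw [pvElems, hiSpec_append, hiSpec_cons, if_neg hcge]
        congr 1
        cases hhs : hiSpec v (pvElems tr) with
        | none => rfl
        | some m =>
          have hm : c < m := hgt m (hiSpec_mem v _ hhs)
          simp [ominO]; omega
      cases htl : tl with
      | leaf =>
        subst htl
        rw [pvInsert.eq_def]; simp only [if_neg hv]
        rw [pvLout, pvRout, hlo, hhi]
        simp [pvElems, loSpec, hiSpec, ominO]
      | node c2 a b =>
        subst htl
        rw [pvInsert.eq_def]; simp only [if_neg hv]
        rw [ihl hil l (c - 1), pvLout, pvLout, pvRout, pvRout, hlo, hhi]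
        congr 2
        cases hhs : hiSpec v (pvElems (PvTree.node c2 a b)) with
        | none => simp [ominO]
        | some m =>
          have : m ≤ c := hle m (hiSpec_mem v _ hhs)
          simp [ominO]; omega

-- A's insert keeps the BST invariant, inserts v (as a multiset), and returns a node
theorem pvInsert_keep (t : PvTree) (hne : t ≠ .leaf) (hinv : pvInv t) (v l r : Int) :
    pvInv (pvInsert t v l r).1 ∧ (pvElems (pvInsert t v l r).1).Perm (v :: pvElems t)
      ∧ (pvInsert t v l r).1 ≠ .leaf := by
  induction t generalizing l r with
  | leaf => exact absurd rfl hne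
  | node c tl tr ihl ihr =>
    obtain ⟨hle, hgt, hil, hir⟩ := hinv
    by_cases hv : v > c
    · cases htr : tr with
      | leaf =>
        subst htr
        rw [pvInsert.eq_def]; simp only [if_pos hv]
        refine ⟨⟨hle, ?_, hil, ⟨by simp [pvElems], by simp [pvElems], trivial, trivial⟩⟩, ?_, by simp⟩
        · intro x hx
          simp [pvElems] at hx
          omega
        · show (pvElems tl ++ c :: pvElems (PvTree.node v .leaf .leaf)).Perm _
          simpa using List.perm_append_singleton v (pvElems tl ++ [c])
      | node c2 a b =>
        subst htr
        rw [pvInsert.eq_def]; simp only [if_pos hv]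
        obtain ⟨h1, h2, h3⟩ := ihr (by simp) hir (c + 1) r
        refine ⟨⟨hle, ?_, hil, h1⟩, ?_, by simp⟩
        · intro x hx
          rcases List.mem_cons.mp (h2.mem_iff.mp hx) with rfl | hx
          · omega
          · exact hgt x hx
        · show (pvElems tl ++ c :: pvElems (pvInsert (PvTree.node c2 a b) v (c + 1) r).1).Perm _
          refine (List.Perm.append_left _ (h2.cons c)).trans ?_
          have : pvElems tl ++ c :: v :: pvElems (PvTree.node c2 a b)
              = (pvElems tl ++ [c]) ++ v :: pvElems (PvTree.node c2 a b) := by simp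
          rw [this]
          refine List.perm_middle.trans ?_
          simp [pvElems]
    · cases htl : tl with
      | leaf =>
        subst htl
        rw [pvInsert.eq_def]; simp only [if_neg hv]
        refine ⟨⟨?_, hgt, ⟨by simp [pvElems], by simp [pvElems], trivial, trivial⟩, hir⟩, ?_, by simp⟩
        · intro x hx
          simp [pvElems] at hx
          omega
        · show (pvElems (PvTree.node v .leaf .leaf) ++ c :: pvElems tr).Perm _
          simp [pvElems]
      | node c2 a b =>
        subst htl
        rw [pvInsert.eq_def]; simp only [if_neg hv]
        obtain ⟨h1, h2, h3⟩ := ihl (by simp) hil l (c - 1)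
        refine ⟨⟨?_, hgt, h1, hir⟩, ?_, by simp⟩
        · intro x hx
          rcases List.mem_cons.mp (h2.mem_iff.mp hx) with rfl | hx
          · omega
          · exact hle x hx
        · show (pvElems (pvInsert (PvTree.node c2 a b) v l (c - 1)).1 ++ c :: pvElems tr).Perm _
          refine (h2.append_right _).trans ?_
          show (v :: pvElems (PvTree.node c2 a b) ++ c :: pvElems tr).Perm _
          simp [pvElems]

-- the two day-loops agree whenever the tree holds exactly the seen prefix
theorem pvLoop_eq (xs : List Int) : ∀ (t : PvTree) (seen : List Int) (day n k : Int),
    pvInv t → t ≠ .leaf → (pvElems t).Perm seen →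
    pvALoop t xs day n k = pvBLoop xs seen day n k := by
  induction xs with
  | nil => intros; rfl
  | cons v rest ih =>
    intro t seen day n k hinv hne hp
    have hb := pvInsert_bounds t hinv v 1 n
    have hsc : pvScan v seen = (loSpec v (pvElems t), hiSpec v (pvElems t)) := by
      rw [pvScan_eq, loSpec_perm v hp, hiSpec_perm v hp]
    simp only [pvALoop, pvBLoop, hb, hsc]
    have hL : (v - pvLout v (pvElems t) 1 = k)
        = (v - (match loSpec v (pvElems t) with | none => (1:Int) | some l => l + 1) = k) := by
      rw [pvLout]
    have hR : (pvRout v (pvElems t) n - v = k)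
        = ((match hiSpec v (pvElems t) with | none => n | some h => h - 1) - v = k) := by
      rw [pvRout]
    by_cases hg : v - pvLout v (pvElems t) 1 = k ∨ pvRout v (pvElems t) n - v = k
    · rw [if_pos hg, if_pos (by rw [← hL, ← hR]; exact hg)]
    · rw [if_neg hg, if_neg (by rw [← hL, ← hR]; exact hg)]
      obtain ⟨h1, h2, h3⟩ := pvInsert_keep t hne hinv v 1 n
      exact ih _ _ _ _ _ h1 h3 (h2.trans ((hp.cons v).trans (List.perm_append_singleton v seen).symm))

-- ===== VERDICT (by name: the statement is the Claim_ definition above) =====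
theorem findKGroup_spec : Claim_equal_findKGroup := by
  intro P k _ hpre
  unfold Spec_findKGroup
  match P with
  | [] => exact absurd rfl hpre
  | p0 :: rest =>
    show findKGroup (p0 :: rest) k = findKGroup_alt (p0 :: rest) k
    simp only [findKGroup, findKGroup_alt, pvBLoop]
    have hsc : pvScan p0 ([] : List Int) = (none, none) := rfl
    rw [hsc]
    by_cases hg : p0 - 1 = k ∨ ((p0 :: rest).length : Int) - p0 = k
    · rw [if_pos hg, if_pos hg]
      norm_num
    · rw [if_neg hg, if_neg hg]
      exact pvLoop_eq rest (.node p0 .leaf .leaf) ([] ++ [p0]) 1 _ k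
        ⟨by simp [pvElems], by simp [pvElems], trivial, trivial⟩ (by simp)
        (by simp [pvElems])
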